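-- pv_equiv track=rewrite | github.com/miny-genie/BOJ | acmicpc_1495.py | play_music
-- ===== SOURCE A (Python) =====
-- def play_music(song_count: int, start_volume: int, max_volume: int, volumes: list) -> int:
--     dp = [[False] * (max_volume + 1) for _ in range(song_count + 1)]
--     dp[0][start_volume] = True
--
--     for cur_idx, cur_vol in enumerate(volumes, 1):
--         bef_idx = cur_idx - 1
--         mixing_volume = False
--         for bef_vol in range(max_volume + 1):
--             if dp[bef_idx][bef_vol]:
--                 if bef_vol + cur_vol <= max_volume:
--                     dp[cur_idx][bef_vol + cur_vol] = True
--                     mixing_volume = True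
--
--                 if bef_vol - cur_vol >= 0:
--                     dp[cur_idx][bef_vol - cur_vol] = True
--                     mixing_volume = True
--
--         if not mixing_volume:
--             return -1
--
--     for idx, volume in enumerate(reversed(dp[-1])):
--         if volume:
--             return max_volume - idx
-- ===== SOURCE B (Python) =====
-- def play_music(song_count: int, start_volume: int, max_volume: int, volumes: list) -> int:
--     # Backward DP: best[v] = maximum final volume achievable starting songs[i:] at volume v, or -1.
--     best = list(range(max_volume + 1))
--     for d in reversed(volumes):
--         best = [max(best[v + d] if 0 <= v + d <= max_volume else -1,
--                     best[v - d] if 0 <= v - d <= max_volume else -1)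
--                 for v in range(max_volume + 1)]
--     return best[start_volume]
-- ===== Notes on version B (the rewrite author's own statement) =====
-- stated objective: alternative
-- what changed: Replaces A's forward boolean reachability DP (propagate reachable-volume set song by song, then scan the last row downward for the maximum) by a backward optimization DP: best[v] = maximum achievable final volume (or -1) when starting the remaining songs at volume v, built from the last song to the first, with the answer read off at best[start_volume].
-- outside the precondition, e.g. on play_music(1, 1, 10, [-3]): A returns 9, B returns 4; on play_music(2, 5, 10, [1]): A returns None, B returns 6
import Mathlib
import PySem

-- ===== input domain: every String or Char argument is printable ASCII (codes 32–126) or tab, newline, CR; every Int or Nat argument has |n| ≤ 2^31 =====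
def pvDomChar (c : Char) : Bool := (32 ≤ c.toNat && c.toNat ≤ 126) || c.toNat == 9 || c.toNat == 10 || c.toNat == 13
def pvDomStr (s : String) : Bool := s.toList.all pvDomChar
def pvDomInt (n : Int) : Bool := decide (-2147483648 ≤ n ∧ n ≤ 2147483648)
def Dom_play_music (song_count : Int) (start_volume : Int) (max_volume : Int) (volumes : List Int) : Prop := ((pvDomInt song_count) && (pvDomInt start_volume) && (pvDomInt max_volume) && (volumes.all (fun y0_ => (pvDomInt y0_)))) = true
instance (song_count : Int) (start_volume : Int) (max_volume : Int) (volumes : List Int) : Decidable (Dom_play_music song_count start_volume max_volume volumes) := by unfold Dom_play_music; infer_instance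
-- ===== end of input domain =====

-- ===== PORT A =====
-- B replaces A's forward boolean reachability DP by a backward optimization DP
-- (best achievable final volume from each state), same cost (objective: alternative).
-- The equivalence is about the RETURN value; neither program mutates its arguments.

-- dp[i][j] = True with Python index semantics (negative j counts from the end; out-of-range write
-- would be an IndexError in Python -- excluded by Pre_, modelled as a no-op here)
def pySetTrue (row : List Bool) (i : Int) : List Bool :=
  let j : Int := if i < 0 then i + row.length else i
  if 0 ≤ j then row.set j.toNat true else row

def matSetTrue (dp : List (List Bool)) (i : Nat) (j : Int) : List (List Bool) :=
  dp.modify i (fun row => pySetTrue row j)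

-- body of A's inner 'for bef_vol in range(max_volume + 1)' loop
def matFun (bef_idx cur_idx : Nat) (cur_vol max_volume : Int) :
    (List (List Bool) × Bool) → Nat → (List (List Bool) × Bool) := fun st bef_vol =>
  if (st.1.getD bef_idx []).getD bef_vol false then
    let st1 := if (bef_vol : Int) + cur_vol ≤ max_volume then
        (matSetTrue st.1 cur_idx ((bef_vol : Int) + cur_vol), true) else st
    if (0 : Int) ≤ (bef_vol : Int) - cur_vol then
        (matSetTrue st1.1 cur_idx ((bef_vol : Int) - cur_vol), true) else st1
  else st

def aInner (dp : List (List Bool)) (bef_idx cur_idx : Nat) (cur_vol max_volume : Int) :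
    List (List Bool) × Bool :=
  (List.range (max_volume + 1).toNat).foldl (matFun bef_idx cur_idx cur_vol max_volume) (dp, false)

-- A's final 'for idx, volume in enumerate(reversed(dp[-1]))' loop; falling off the end of the
-- Python function returns None (no int) -- excluded by Pre_, modelled as 0 here
def scanRev (max_volume : Int) : List Bool → Int → Int
  | [], _ => 0
  | b :: rest, idx => if b then max_volume - idx else scanRev max_volume rest (idx + 1)

def aLoop (max_volume : Int) : List Int → List (List Bool) → Nat → Int
  | [], dp, _ => scanRev max_volume (PySem.List.pyGetD dp (-1) []).reverse 0
  | cur_vol :: rest, dp, cur_idx =>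
    let st := aInner dp (cur_idx - 1) cur_idx cur_vol max_volume
    if st.2 then aLoop max_volume rest st.1 (cur_idx + 1) else -1

def play_music (song_count : Int) (start_volume : Int) (max_volume : Int) (volumes : List Int) : Int :=
  let dp0 := List.replicate (song_count + 1).toNat (List.replicate (max_volume + 1).toNat false)
  let dp1 := matSetTrue dp0 0 start_volume
  aLoop max_volume volumes dp1 1

-- ===== PORT B =====
-- one backward step: from the table for the remaining songs, the table with one more song in front
-- (the guards keep both indexings inside the table, exactly as in Source B)
def bRow (mv d : Int) (best : List Int) : List Int :=
  (List.range (mv + 1).toNat).map (fun (v : Nat) =>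
    max (if 0 ≤ (v : Int) + d ∧ (v : Int) + d ≤ mv then best.getD ((v : Int) + d).toNat (-1) else -1)
        (if 0 ≤ (v : Int) - d ∧ (v : Int) - d ≤ mv then best.getD ((v : Int) - d).toNat (-1) else -1))

def play_music_alt (song_count : Int) (start_volume : Int) (max_volume : Int) (volumes : List Int) : Int :=
  PySem.List.pyGetD
    (volumes.foldr (bRow max_volume) ((List.range (max_volume + 1).toNat).map (fun v => Int.ofNat v)))
    start_volume (-1)

-- ===== PRECONDITION & SPEC =====
-- the start volume both programs effectively use (Python indexes a row of length max_volume+1,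
-- so a negative start in [-(max_volume+1), -1] denotes position start+max_volume+1 in both)
def effStart (sv mv : Int) : Int := if sv < 0 then sv + mv + 1 else sv

-- Pre_ admits the normal domain (volumes list of length song_count, volumes nonnegative, start in
-- [-(max_volume+1), max_volume] -- both programs read a negative start by Python's negative indexing
-- of the same row) plus the inputs on which the reachable set is provably emptied at a song the table
-- still covers (first volume out of range from the effective start, or some volume larger than
-- max_volume after a nonnegative prefix): both programs then return -1 before the rest of the input
-- matters.  It excludes inputs where A raises (start or a volume out of the table, more songs than
-- song_count), where A falls off the function and returns None instead of an int (fewer volumes than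
-- song_count), and the negative-volume inputs on which A's value arises only by Python's
-- negative-index wraparound of a WRITE (accidental; B's symmetric ±d reading can disagree there).
def Pre_play_music (song_count : Int) (start_volume : Int) (max_volume : Int) (volumes : List Int) : Prop :=
  0 ≤ max_volume ∧ -(max_volume + 1) ≤ start_volume ∧ start_volume ≤ max_volume ∧
  (((volumes.length : Int) = song_count ∧ ∀ v ∈ volumes, 0 ≤ v) ∨
    (0 ≤ song_count ∧ volumes ≠ [] ∧ 0 ≤ volumes.headD 0 ∧
      max_volume - effStart start_volume max_volume < volumes.headD 0 ∧
      effStart start_volume max_volume < volumes.headD 0) ∨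
    (0 ≤ song_count ∧ ∃ i, i < volumes.length ∧ (i : Int) ≤ song_count ∧
      (∀ j : Nat, j ≤ i → 0 ≤ volumes.getD j 0) ∧ max_volume < volumes.getD i 0))
instance (song_count : Int) (start_volume : Int) (max_volume : Int) (volumes : List Int) : Decidable (Pre_play_music song_count start_volume max_volume volumes) := by unfold Pre_play_music; infer_instance

def pvWitness_play_music : Int × Int × Int × List Int := (2, 5, 10, [3, 7])

def Spec_play_music (song_count : Int) (start_volume : Int) (max_volume : Int) (volumes : List Int) (out : Int) : Prop := out = play_music_alt song_count start_volume max_volume volumes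
instance (song_count : Int) (start_volume : Int) (max_volume : Int) (volumes : List Int) (out : Int) : Decidable (Spec_play_music song_count start_volume max_volume volumes out) := by unfold Spec_play_music; infer_instance

-- ===== CLAIM (what is proved, stated in full; the proofs are below) =====
def Claim_equal_play_music : Prop := ∀ (song_count : Int) (start_volume : Int) (max_volume : Int) (volumes : List Int), Dom_play_music song_count start_volume max_volume volumes → Pre_play_music song_count start_volume max_volume volumes → Spec_play_music song_count start_volume max_volume volumes (play_music song_count start_volume max_volume volumes)

-- ===== LEMMAS AND PROOFS =====

-- proof-side abstraction of A's forward loop: the reachable set as a Nat bitmask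
def bitLength (n : Nat) : Int := if n = 0 then 0 else (Nat.log2 n : Int) + 1

def bLoop (mask : Nat) : List Int → Nat → Int
  | [], reach => bitLength reach - 1
  | vol :: rest, reach =>
    let reach' := ((reach <<< vol.toNat) ||| (reach >>> vol.toNat)) &&& mask
    if reach' = 0 then -1 else bLoop mask rest reach'

-- proof-side specification of B's backward table: best final volume from v through vols, or -1
def bestF (mv : Int) : List Int → Int → Int
  | [], v => v
  | d :: rest, v =>
    max (if 0 ≤ v + d ∧ v + d ≤ mv then bestF mv rest (v + d) else -1)
        (if 0 ≤ v - d ∧ v - d ≤ mv then bestF mv rest (v - d) else -1)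

-- max of f over the set bits of reach below N
def bitFoldMax (N reach : Nat) (f : Nat → Int) : Int :=
  (List.range N).foldl (fun m v => if reach.testBit v then max m (f v) else m) (-1)

-- row-level version of A's inner loop (reads a frozen copy of the previous row)
def rowFun (befRow : List Bool) (cur_vol max_volume : Int) :
    (List Bool × Bool) → Nat → (List Bool × Bool) := fun st bef_vol =>
  if befRow.getD bef_vol false then
    let st1 := if (bef_vol : Int) + cur_vol ≤ max_volume then
        (pySetTrue st.1 ((bef_vol : Int) + cur_vol), true) else st
    if (0 : Int) ≤ (bef_vol : Int) - cur_vol then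
        (pySetTrue st1.1 ((bef_vol : Int) - cur_vol), true) else st1
  else st

lemma pySetTrue_nonneg (row : List Bool) (i : Int) (h : 0 ≤ i) :
    pySetTrue row i = row.set i.toNat true := by
  unfold pySetTrue
  rw [show (if i < 0 then i + (row.length : Int) else i) = i from if_neg (by omega), if_pos h]

lemma length_pySetTrue (row : List Bool) (i : Int) : (pySetTrue row i).length = row.length := by
  unfold pySetTrue; split <;> { dsimp only; split <;> simp }

lemma length_matSetTrue (dp : List (List Bool)) (i : Nat) (j : Int) :
    (matSetTrue dp i j).length = dp.length := by
  simp [matSetTrue]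

lemma getD_matSetTrue_ne (dp : List (List Bool)) (i k : Nat) (j : Int) (h : k ≠ i) :
    (matSetTrue dp i j).getD k [] = dp.getD k [] := by
  simp [matSetTrue, List.getD_eq_getElem?_getD, Ne.symm h]

lemma getD_matSetTrue_self (dp : List (List Bool)) (i : Nat) (j : Int) (h : i < dp.length) :
    (matSetTrue dp i j).getD i [] = pySetTrue (dp.getD i []) j := by
  simp [matSetTrue, List.getD_eq_getElem?_getD, List.getElem?_eq_getElem h]

lemma matFun_step (bef cur : Nat) (cv mv : Int)
    (dp : List (List Bool)) (mix : Bool) (bv : Nat) (hcur : cur < dp.length) :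
    (matFun bef cur cv mv (dp, mix) bv).1.length = dp.length ∧
    (∀ k, k ≠ cur → (matFun bef cur cv mv (dp, mix) bv).1.getD k [] = dp.getD k []) ∧
    ((matFun bef cur cv mv (dp, mix) bv).1.getD cur [], (matFun bef cur cv mv (dp, mix) bv).2)
      = rowFun (dp.getD bef []) cv mv (dp.getD cur [], mix) bv := by
  unfold matFun rowFun
  dsimp only
  split
  · split <;> split <;>
      refine ⟨by simp [length_matSetTrue], fun k hk => by
          simp only [getD_matSetTrue_ne _ _ _ _ hk], by
        first
          | rfl
          | rw [getD_matSetTrue_self _ _ _ hcur]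
          | rw [getD_matSetTrue_self _ _ _ (by simpa [length_matSetTrue] using hcur),
                getD_matSetTrue_self _ _ _ hcur]⟩
  · exact ⟨rfl, fun _ _ => rfl, rfl⟩

lemma aInner_rows (L : List Nat) (bef cur : Nat) (hne : bef ≠ cur) (cv mv : Int) :
    ∀ (dp : List (List Bool)) (mix : Bool), cur < dp.length →
    (L.foldl (matFun bef cur cv mv) (dp, mix)).1.length = dp.length ∧
    (∀ k, k ≠ cur → (L.foldl (matFun bef cur cv mv) (dp, mix)).1.getD k [] = dp.getD k []) ∧
    ((L.foldl (matFun bef cur cv mv) (dp, mix)).1.getD cur [],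
     (L.foldl (matFun bef cur cv mv) (dp, mix)).2)
      = L.foldl (rowFun (dp.getD bef []) cv mv) (dp.getD cur [], mix) := by
  induction L with
  | nil => exact fun dp mix h => ⟨rfl, fun _ _ => rfl, rfl⟩
  | cons bv L ih =>
    intro dp mix hcur
    obtain ⟨hlen, hne', hcur'⟩ := matFun_step bef cur cv mv dp mix bv hcur
    obtain ⟨ihlen, ihne, ihcur⟩ :=
      ih (matFun bef cur cv mv (dp, mix) bv).1 (matFun bef cur cv mv (dp, mix) bv).2
        (hlen ▸ hcur)
    simp only [List.foldl_cons]
    refine ⟨by rw [ihlen, hlen], fun k hk => by rw [ihne k hk, hne' k hk], ?_⟩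
    rw [ihcur, hne' bef hne, hcur']

lemma getD_pySetTrue (row : List Bool) (i : Int) (h0 : 0 ≤ i) (v : Nat) :
    (pySetTrue row i).getD v false = true ↔
      ((v : Int) = i ∧ v < row.length) ∨ row.getD v false = true := by
  rw [pySetTrue_nonneg _ _ h0]
  simp only [List.getD_eq_getElem?_getD, List.getElem?_set]
  split_ifs with h1 h2
  · simp; omega
  · rw [List.getElem?_eq_none (by omega)]; simp; omega
  · constructor
    · intro h; exact Or.inr h
    · rintro (⟨hv, _⟩ | h)
      · omega
      · exact h

lemma rowFold_prefix (r : List Bool) (cv mv : Int) (hcv : 0 ≤ cv) (hmv : 0 ≤ mv)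
    (hr : r.length = (mv + 1).toNat) (k : Nat) :
    ((List.range k).foldl (rowFun r cv mv) (List.replicate (mv + 1).toNat false, false)).1.length
      = (mv + 1).toNat ∧
    (∀ v : Nat,
      ((List.range k).foldl (rowFun r cv mv) (List.replicate (mv + 1).toNat false, false)).1.getD v false = true ↔
      ∃ u, u < k ∧ r.getD u false = true ∧
        (((u : Int) + cv = v ∧ (v : Int) ≤ mv) ∨ ((u : Int) - cv = v))) ∧
    (((List.range k).foldl (rowFun r cv mv) (List.replicate (mv + 1).toNat false, false)).2 = true ↔
      ∃ u, u < k ∧ r.getD u false = true ∧ ((u : Int) + cv ≤ mv ∨ cv ≤ (u : Int))) := by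
  induction k with
  | zero =>
    refine ⟨by simp, fun v => by simp, by simp⟩
  | succ k ih =>
    obtain ⟨h1, h2, h3⟩ := ih
    rw [List.range_succ, List.foldl_append, List.foldl_cons, List.foldl_nil]
    by_cases hb : r.getD k false = true
    case neg =>
      have hstep : rowFun r cv mv
          ((List.range k).foldl (rowFun r cv mv) (List.replicate (mv + 1).toNat false, false)) k
          = (List.range k).foldl (rowFun r cv mv) (List.replicate (mv + 1).toNat false, false) := by
        simp only [rowFun]; rw [if_neg hb]
      rw [hstep]
      refine ⟨h1, fun v => ?_, ?_⟩
      · rw [h2 v]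
        constructor
        · rintro ⟨u, hu, hr', hc⟩; exact ⟨u, by omega, hr', hc⟩
        · rintro ⟨u, hu, hr', hc⟩
          refine ⟨u, ?_, hr', hc⟩
          rcases Nat.lt_succ_iff_lt_or_eq.mp hu with h | h
          · exact h
          · subst h; exact absurd hr' hb
      · rw [h3]
        constructor
        · rintro ⟨u, hu, hr', hc⟩; exact ⟨u, by omega, hr', hc⟩
        · rintro ⟨u, hu, hr', hc⟩
          refine ⟨u, ?_, hr', hc⟩
          rcases Nat.lt_succ_iff_lt_or_eq.mp hu with h | h
          · exact h
          · subst h; exact absurd hr' hb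
    case pos =>
      have hkM : k < (mv + 1).toNat := by
        by_contra hk
        rw [List.getD_eq_getElem?_getD, List.getElem?_eq_none (by omega)] at hb
        simp at hb
      simp only [rowFun]
      rw [if_pos hb]
      by_cases hp : (k : Int) + cv ≤ mv <;> by_cases hq : (0 : Int) ≤ (k : Int) - cv
      · -- both branches fire
        rw [if_pos hp, if_pos hq]
        dsimp only
        refine ⟨by rw [length_pySetTrue, length_pySetTrue, h1], fun v => ?_, ?_⟩
        · rw [getD_pySetTrue _ _ hq v, length_pySetTrue, h1,
              getD_pySetTrue _ _ (by omega : (0 : Int) ≤ (k : Int) + cv) v, h1, h2 v]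
          constructor
          · rintro (⟨hv, hvM⟩ | ⟨hv, hvM⟩ | ⟨u, hu, hr', hc⟩)
            · exact ⟨k, by omega, hb, Or.inr (by omega)⟩
            · exact ⟨k, by omega, hb, Or.inl ⟨by omega, by omega⟩⟩
            · exact ⟨u, by omega, hr', hc⟩
          · rintro ⟨u, hu, hr', hc⟩
            rcases Nat.lt_succ_iff_lt_or_eq.mp hu with h | h
            · exact Or.inr (Or.inr ⟨u, h, hr', hc⟩)
            · subst h
              rcases hc with ⟨hv, hvmv⟩ | hv
              · exact Or.inr (Or.inl ⟨by omega, by omega⟩)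
              · exact Or.inl ⟨by omega, by omega⟩
        · constructor
          · intro _; exact ⟨k, by omega, hb, Or.inl hp⟩
          · intro _; rfl
      · -- only plus branch
        rw [if_pos hp, if_neg hq]
        dsimp only
        refine ⟨by rw [length_pySetTrue, h1], fun v => ?_, ?_⟩
        · rw [getD_pySetTrue _ _ (by omega : (0 : Int) ≤ (k : Int) + cv) v, h1, h2 v]
          constructor
          · rintro (⟨hv, hvM⟩ | ⟨u, hu, hr', hc⟩)
            · exact ⟨k, by omega, hb, Or.inl ⟨by omega, by omega⟩⟩
            · exact ⟨u, by omega, hr', hc⟩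
          · rintro ⟨u, hu, hr', hc⟩
            rcases Nat.lt_succ_iff_lt_or_eq.mp hu with h | h
            · exact Or.inr ⟨u, h, hr', hc⟩
            · subst h
              rcases hc with ⟨hv, hvmv⟩ | hv
              · exact Or.inl ⟨by omega, by omega⟩
              · omega
        · constructor
          · intro _; exact ⟨k, by omega, hb, Or.inl hp⟩
          · intro _; rfl
      · -- only minus branch
        rw [if_neg hp, if_pos hq]
        dsimp only
        refine ⟨by rw [length_pySetTrue, h1], fun v => ?_, ?_⟩
        · rw [getD_pySetTrue _ _ hq v, h1, h2 v]
          constructor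
          · rintro (⟨hv, hvM⟩ | ⟨u, hu, hr', hc⟩)
            · exact ⟨k, by omega, hb, Or.inr (by omega)⟩
            · exact ⟨u, by omega, hr', hc⟩
          · rintro ⟨u, hu, hr', hc⟩
            rcases Nat.lt_succ_iff_lt_or_eq.mp hu with h | h
            · exact Or.inr ⟨u, h, hr', hc⟩
            · subst h
              rcases hc with ⟨hv, hvmv⟩ | hv
              · omega
              · exact Or.inl ⟨by omega, by omega⟩
        · constructor
          · intro _; exact ⟨k, by omega, hb, Or.inr (by omega)⟩
          · intro _; rfl
      · -- neither branch fires
        rw [if_neg hp, if_neg hq]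
        refine ⟨h1, fun v => ?_, ?_⟩
        · rw [h2 v]
          constructor
          · rintro ⟨u, hu, hr', hc⟩; exact ⟨u, by omega, hr', hc⟩
          · rintro ⟨u, hu, hr', hc⟩
            rcases Nat.lt_succ_iff_lt_or_eq.mp hu with h | h
            · exact ⟨u, h, hr', hc⟩
            · subst h
              rcases hc with ⟨hv, hvmv⟩ | hv
              · omega
              · omega
        · rw [h3]
          constructor
          · rintro ⟨u, hu, hr', hc⟩; exact ⟨u, by omega, hr', hc⟩
          · rintro ⟨u, hu, hr', hc⟩
            rcases Nat.lt_succ_iff_lt_or_eq.mp hu with h | h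
            · exact ⟨u, h, hr', hc⟩
            · subst h; rcases hc with h | h <;> omega

lemma scanRev_first (mv : Int) : ∀ (l : List Bool) (j : Nat) (idx : Int), j < l.length →
    l.getD j false = true → (∀ i, i < j → l.getD i false = false) →
    scanRev mv l idx = mv - idx - j := by
  intro l
  induction l with
  | nil => intro j idx h; simp at h
  | cons b rest ih =>
    intro j idx hj hget hlt
    match j with
    | 0 =>
      have hb : b = true := by simpa using hget
      simp [scanRev, hb]
    | j + 1 =>
      have hb : b = false := by simpa using hlt 0 (by omega)
      simp only [scanRev, hb, Bool.false_eq_true, if_false]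
      rw [ih j (idx + 1) (by simpa using hj) (by simpa using hget)
          (fun i hi => by simpa using hlt (i + 1) (by omega))]
      push_cast
      ring

lemma testBit_log2 (n : Nat) (h : n ≠ 0) : Nat.testBit n (Nat.log2 n) = true := by
  have h1 : 2 ^ Nat.log2 n ≤ n := Nat.log2_self_le h
  have h2 : n < 2 ^ (Nat.log2 n + 1) := Nat.lt_log2_self
  rw [Nat.testBit_eq_decide_div_mod_eq]
  have h3 : n / 2 ^ Nat.log2 n = 1 := by
    rw [pow_succ] at h2
    exact Nat.div_eq_of_lt_le (by omega) (by omega)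
  simp [h3]

lemma testBit_gt_log2 (n j : Nat) (h : Nat.log2 n < j) : Nat.testBit n j = false := by
  apply Nat.testBit_lt_two_pow
  calc n < 2 ^ (Nat.log2 n + 1) := Nat.lt_log2_self
    _ ≤ 2 ^ j := Nat.pow_le_pow_right (by omega) (by omega)

lemma final_eq (r : List Bool) (reach : Nat) (mv : Int) (hmv : 0 ≤ mv)
    (hr : r.length = (mv + 1).toNat)
    (hbits : ∀ v, r.getD v false = Nat.testBit reach v) (hne : reach ≠ 0) :
    scanRev mv r.reverse 0 = (Nat.log2 reach : Int) := by
  have hbit : Nat.testBit reach (Nat.log2 reach) = true := testBit_log2 reach hne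
  have hkM : Nat.log2 reach < (mv + 1).toNat := by
    by_contra hcon
    have hfalse : r.getD (Nat.log2 reach) false = false := by
      rw [List.getD_eq_getElem?_getD, List.getElem?_eq_none (by omega)]; rfl
    rw [hbits, hbit] at hfalse
    cases hfalse
  have hrev : ∀ i, i < (mv + 1).toNat →
      r.reverse.getD i false = r.getD ((mv + 1).toNat - 1 - i) false := by
    intro i hi
    rw [List.getD_eq_getElem?_getD, List.getD_eq_getElem?_getD,
        List.getElem?_reverse (by omega : i < r.length), hr]
  have hmain := scanRev_first mv r.reverse ((mv + 1).toNat - 1 - Nat.log2 reach) 0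
    (by simp [hr]; omega)
    (by rw [hrev _ (by omega),
            show (mv + 1).toNat - 1 - ((mv + 1).toNat - 1 - Nat.log2 reach) = Nat.log2 reach
              by omega, hbits, hbit])
    (fun i hi => by
      rw [hrev i (by omega), hbits]
      exact testBit_gt_log2 reach _ (by omega))
  rw [hmain]
  omega

lemma bool_eq_of_iff {a b : Bool} (h : a = true ↔ b = true) : a = b := by
  cases a <;> cases b <;> simp_all

lemma reach'_testBit (reach : Nat) (cv mv : Int) (hcv : 0 ≤ cv) (hmv : 0 ≤ mv)
    (r : List Bool) (hrlen : r.length = (mv + 1).toNat)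
    (hbits : ∀ v, r.getD v false = Nat.testBit reach v) (v : Nat) :
    Nat.testBit (((reach <<< cv.toNat) ||| (reach >>> cv.toNat)) &&& (2 ^ (mv + 1).toNat - 1)) v
      = true ↔
    ∃ u, u < (mv + 1).toNat ∧ r.getD u false = true ∧
      (((u : Int) + cv = v ∧ (v : Int) ≤ mv) ∨ ((u : Int) - cv = v)) := by
  rw [Nat.testBit_and, Nat.testBit_or, Nat.testBit_shiftLeft, Nat.testBit_shiftRight,
      Nat.testBit_two_pow_sub_one]
  simp only [Bool.and_eq_true, Bool.or_eq_true, decide_eq_true_eq, ge_iff_le]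
  constructor
  · rintro ⟨⟨hge, hbit⟩ | hbit, hvM⟩
    · exact ⟨v - cv.toNat, by omega, by rw [hbits]; exact hbit, Or.inl ⟨by omega, by omega⟩⟩
    · have huM : cv.toNat + v < (mv + 1).toNat := by
        by_contra hcon
        have hfalse : r.getD (cv.toNat + v) false = false := by
          rw [List.getD_eq_getElem?_getD, List.getElem?_eq_none (by omega)]; rfl
        rw [hbits, hbit] at hfalse
        cases hfalse
      exact ⟨cv.toNat + v, huM, by rw [hbits]; exact hbit, Or.inr (by omega)⟩
  · rintro ⟨u, huM, hu, ⟨hsum, hle⟩ | hdiff⟩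
    · refine ⟨Or.inl ⟨by omega, ?_⟩, by omega⟩
      rw [show v - cv.toNat = u by omega, ← hbits]
      exact hu
    · refine ⟨Or.inr ?_, by omega⟩
      rw [show cv.toNat + v = u by omega, ← hbits]
      exact hu

lemma loop_eq (mv : Int) (hmv : 0 ≤ mv) (vols : List Int) :
    ∀ (dp : List (List Bool)) (i : Nat) (reach : Nat),
    (∀ v ∈ vols, 0 ≤ v) →
    dp.length = i + vols.length + 1 →
    (∀ v : Nat, (dp.getD i []).getD v false = Nat.testBit reach v) →
    (dp.getD i []).length = (mv + 1).toNat →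
    (∀ k, i < k → k < dp.length → dp.getD k [] = List.replicate (mv + 1).toNat false) →
    reach ≠ 0 →
    aLoop mv vols dp (i + 1) = bLoop ((1 <<< (mv + 1).toNat) - 1) vols reach := by
  induction vols with
  | nil =>
    intro dp i reach hpos hlen hbits hrlen hrows hne
    simp only [aLoop, bLoop]
    have hdpne : dp ≠ [] := by
      intro h; rw [h] at hlen; simp at hlen
    have hidx : dp.length - 1 = i := by simp at hlen; omega
    have hlast : PySem.List.pyGetD dp (-1) [] = dp.getD i [] := by
      rw [PySem.List.pyGetD_neg_one dp [] hdpne, List.getLast_eq_getElem,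
          List.getD_eq_getElem?_getD, List.getElem?_eq_getElem (by omega)]
      simp [hidx]
    rw [hlast, final_eq (dp.getD i []) reach mv hmv hrlen hbits hne, bitLength, if_neg hne]
    ring
  | cons cv rest ih =>
    intro dp i reach hpos hlen hbits hrlen hrows hne
    have hcv : 0 ≤ cv := hpos cv (by simp)
    have hmvi : ((mv + 1).toNat : Int) = mv + 1 := by omega
    have hcur : i + 1 < dp.length := by simp at hlen; omega
    obtain ⟨hL, hNe, hCur⟩ :=
      aInner_rows (List.range (mv + 1).toNat) i (i + 1) (by omega) cv mv dp false hcur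
    have hfresh : dp.getD (i + 1) [] = List.replicate (mv + 1).toNat false :=
      hrows (i + 1) (by omega) hcur
    rw [hfresh] at hCur
    obtain ⟨g1, g2, g3⟩ := rowFold_prefix (dp.getD i []) cv mv hcv hmv hrlen (mv + 1).toNat
    have hcur1 : (aInner dp i (i + 1) cv mv).1.getD (i + 1) []
        = ((List.range (mv + 1).toNat).foldl (rowFun (dp.getD i []) cv mv)
            (List.replicate (mv + 1).toNat false, false)).1 := congrArg Prod.fst hCur
    have hcur2 : (aInner dp i (i + 1) cv mv).2
        = ((List.range (mv + 1).toNat).foldl (rowFun (dp.getD i []) cv mv)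
            (List.replicate (mv + 1).toNat false, false)).2 := congrArg Prod.snd hCur
    have hstepbits : ∀ v : Nat, ((aInner dp i (i + 1) cv mv).1.getD (i + 1) []).getD v false
        = Nat.testBit (((reach <<< cv.toNat) ||| (reach >>> cv.toNat))
            &&& (2 ^ (mv + 1).toNat - 1)) v := by
      intro v
      rw [hcur1]
      exact bool_eq_of_iff
        ((g2 v).trans (reach'_testBit reach cv mv hcv hmv _ hrlen hbits v).symm)
    have hmix : (aInner dp i (i + 1) cv mv).2 = true ↔
        ((reach <<< cv.toNat) ||| (reach >>> cv.toNat)) &&& (2 ^ (mv + 1).toNat - 1) ≠ 0 := by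
      rw [hcur2, g3]
      constructor
      · rintro ⟨u, huM, hu, hc⟩ hz
        rcases hc with hle | hge
        · have hb := (reach'_testBit reach cv mv hcv hmv _ hrlen hbits (u + cv.toNat)).mpr
            ⟨u, huM, hu, Or.inl ⟨by omega, by omega⟩⟩
          rw [hz, Nat.zero_testBit] at hb
          cases hb
        · have hb := (reach'_testBit reach cv mv hcv hmv _ hrlen hbits (u - cv.toNat)).mpr
            ⟨u, huM, hu, Or.inr (by omega)⟩
          rw [hz, Nat.zero_testBit] at hb
          cases hb
      · intro hz
        obtain ⟨v, hv⟩ : ∃ v, Nat.testBit (((reach <<< cv.toNat) ||| (reach >>> cv.toNat))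
            &&& (2 ^ (mv + 1).toNat - 1)) v = true := by
          by_contra hno
          push Not at hno
          exact hz (Nat.eq_of_testBit_eq (fun i => by
            rw [Nat.zero_testBit]
            exact Bool.eq_false_iff.mpr (hno i)))
        obtain ⟨u, huM, hu, hc⟩ :=
          (reach'_testBit reach cv mv hcv hmv _ hrlen hbits v).mp hv
        refine ⟨u, huM, hu, ?_⟩
        rcases hc with ⟨hsum, hle⟩ | hdiff
        · exact Or.inl (by omega)
        · exact Or.inr (by omega)
    simp only [aLoop, bLoop, Nat.add_sub_cancel]
    by_cases hz : ((reach <<< cv.toNat) ||| (reach >>> cv.toNat))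
        &&& (2 ^ (mv + 1).toNat - 1) = 0
    · have hmixf : (aInner dp i (i + 1) cv mv).2 = false := by
        cases hA : (aInner dp i (i + 1) cv mv).2
        · rfl
        · exact absurd hz (hmix.mp hA)
      rw [hmixf]
      rw [Nat.one_shiftLeft] at *
      simp [hz]
    · have hmixt : (aInner dp i (i + 1) cv mv).2 = true := hmix.mpr hz
      rw [hmixt]
      simp only [if_true]
      rw [Nat.one_shiftLeft, if_neg hz]
      have hihr := ih (aInner dp i (i + 1) cv mv).1 (i + 1)
        (((reach <<< cv.toNat) ||| (reach >>> cv.toNat)) &&& (2 ^ (mv + 1).toNat - 1))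
        (fun v hv => hpos v (by simp [hv]))
        (by unfold aInner; rw [hL]; simp at hlen ⊢; omega)
        hstepbits
        (by rw [hcur1]; exact g1)
        (fun k hk1 hk2 => by
          unfold aInner at hk2 ⊢
          rw [hL] at hk2
          rw [hNe k (by omega), hrows k (by omega) hk2])
        hz
      rw [Nat.one_shiftLeft] at hihr
      exact hihr

lemma foldl_matFun_noop (bef cur : Nat) (cv mv : Int) (dp : List (List Bool))
    (h : ∀ bv : Nat, (dp.getD bef []).getD bv false = true →
      ¬((bv : Int) + cv ≤ mv) ∧ ¬((0 : Int) ≤ (bv : Int) - cv)) :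
    ∀ L : List Nat, L.foldl (matFun bef cur cv mv) (dp, false) = (dp, false) := by
  intro L
  induction L with
  | nil => rfl
  | cons bv L ih =>
    rw [List.foldl_cons]
    have hstep : matFun bef cur cv mv (dp, false) bv = (dp, false) := by
      unfold matFun
      dsimp only
      by_cases hb : (dp.getD bef []).getD bv false = true
      · obtain ⟨h1, h2⟩ := h bv hb
        rw [if_pos hb, if_neg h1, if_neg h2]
      · rw [if_neg hb]
    rw [hstep, ih]

lemma loop_kill (mv : Int) (hmv : 0 ≤ mv) (vols : List Int) :
    ∀ (dp : List (List Bool)) (i : Nat) (reach : Nat) (idx : Nat),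
    idx < vols.length →
    i + idx < dp.length →
    (∀ j : Nat, j ≤ idx → 0 ≤ vols.getD j 0) →
    mv < vols.getD idx 0 →
    (∀ v : Nat, (dp.getD i []).getD v false = Nat.testBit reach v) →
    (dp.getD i []).length = (mv + 1).toNat →
    (∀ k, i < k → k < dp.length → dp.getD k [] = List.replicate (mv + 1).toNat false) →
    aLoop mv vols dp (i + 1) = -1 := by
  induction vols with
  | nil =>
    intro dp i reach idx hidx
    simp at hidx
  | cons cv rest ih =>
    intro dp i reach idx hidx hbound hpref hkill hbits hrlen hrows
    have hcv : 0 ≤ cv := by simpa using hpref 0 (by omega)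
    have hmvi : ((mv + 1).toNat : Int) = mv + 1 := by omega
    simp only [aLoop, Nat.add_sub_cancel]
    cases idx with
    | zero =>
      have hkill0 : mv < cv := by simpa using hkill
      have hA : aInner dp i (i + 1) cv mv = (dp, false) := by
        unfold aInner
        apply foldl_matFun_noop
        intro bv hb
        have hbvM : bv < (mv + 1).toNat := by
          by_contra hcon
          rw [List.getD_eq_getElem?_getD, List.getElem?_eq_none (by omega)] at hb
          cases hb
        constructor <;> omega
      rw [hA]
      simp
    | succ idx' =>
      have hcur : i + 1 < dp.length := by omega
      obtain ⟨hL, hNe, hCur⟩ :=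
        aInner_rows (List.range (mv + 1).toNat) i (i + 1) (by omega) cv mv dp false hcur
      have hfresh : dp.getD (i + 1) [] = List.replicate (mv + 1).toNat false :=
        hrows (i + 1) (by omega) hcur
      rw [hfresh] at hCur
      obtain ⟨g1, g2, g3⟩ := rowFold_prefix (dp.getD i []) cv mv hcv hmv hrlen (mv + 1).toNat
      have hcur1 : (aInner dp i (i + 1) cv mv).1.getD (i + 1) []
          = ((List.range (mv + 1).toNat).foldl (rowFun (dp.getD i []) cv mv)
              (List.replicate (mv + 1).toNat false, false)).1 := congrArg Prod.fst hCur
      have hstepbits : ∀ v : Nat, ((aInner dp i (i + 1) cv mv).1.getD (i + 1) []).getD v false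
          = Nat.testBit (((reach <<< cv.toNat) ||| (reach >>> cv.toNat))
              &&& (2 ^ (mv + 1).toNat - 1)) v := by
        intro v
        rw [hcur1]
        exact bool_eq_of_iff
          ((g2 v).trans (reach'_testBit reach cv mv hcv hmv _ hrlen hbits v).symm)
      cases hA : (aInner dp i (i + 1) cv mv).2
      · rfl
      · have hrec := ih (aInner dp i (i + 1) cv mv).1 (i + 1)
          (((reach <<< cv.toNat) ||| (reach >>> cv.toNat)) &&& (2 ^ (mv + 1).toNat - 1)) idx'
          (by simpa using hidx)
          (by unfold aInner; rw [hL]; omega)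
          (fun j hj => by simpa using hpref (j + 1) (by omega))
          (by simpa using hkill)
          hstepbits
          (by rw [hcur1]; exact g1)
          (fun k hk1 hk2 => by
            unfold aInner at hk2 ⊢
            rw [hL] at hk2
            rw [hNe k (by omega), hrows k (by omega) hk2])
        simpa using hrec

-- ---------- B side: the backward table computes bestF ----------

lemma getD_map_range_int (N : Nat) (f : Nat → Int) (v : Nat) (hv : v < N) :
    ((List.range N).map f).getD v (-1) = f v := by
  rw [List.getD_eq_getElem?_getD, List.getElem?_map, List.getElem?_range hv]
  rfl

lemma alt_table (mv : Int) (hmv : 0 ≤ mv) (vols : List Int) :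
    ∀ (v : Nat), v < (mv + 1).toNat →
    (vols.foldr (bRow mv) ((List.range (mv + 1).toNat).map (fun w => Int.ofNat w))).getD v (-1)
      = bestF mv vols (v : Int) := by
  induction vols with
  | nil =>
    intro v hv
    simp only [List.foldr_nil]
    rw [getD_map_range_int _ _ v hv]
    rfl
  | cons d rest ih =>
    intro v hv
    simp only [List.foldr_cons, bRow]
    rw [getD_map_range_int _ _ v hv]
    show _ = bestF mv (d :: rest) (v : Int)
    simp only [bestF]
    congr 1
    · by_cases hp : 0 ≤ (v : Int) + d ∧ (v : Int) + d ≤ mv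
      · rw [if_pos hp, if_pos hp,
            ih ((v : Int) + d).toNat (by omega),
            Int.toNat_of_nonneg hp.1]
      · rw [if_neg hp, if_neg hp]
    · by_cases hq : 0 ≤ (v : Int) - d ∧ (v : Int) - d ≤ mv
      · rw [if_pos hq, if_pos hq,
            ih ((v : Int) - d).toNat (by omega),
            Int.toNat_of_nonneg hq.1]
      · rw [if_neg hq, if_neg hq]

lemma bestF_lower (mv : Int) : ∀ (vols : List Int) (v : Int), 0 ≤ v → -1 ≤ bestF mv vols v := by
  intro vols
  induction vols with
  | nil => intro v hv; simp only [bestF]; omega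
  | cons d rest ih =>
    intro v hv
    simp only [bestF]
    refine le_trans ?_ (le_max_left _ _)
    split_ifs with h
    · exact ih _ h.1
    · exact le_refl _

lemma bestF_kill (mv : Int) (hmv : 0 ≤ mv) : ∀ (vols : List Int) (idx : Nat),
    idx < vols.length → (∀ j : Nat, j ≤ idx → 0 ≤ vols.getD j 0) → mv < vols.getD idx 0 →
    ∀ v : Int, 0 ≤ v → v ≤ mv → bestF mv vols v = -1 := by
  intro vols
  induction vols with
  | nil => intro idx h; simp at h
  | cons d rest ih =>
    intro idx hidx hpref hkill v hv0 hvm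
    cases idx with
    | zero =>
      have hd : mv < d := by simpa using hkill
      simp only [bestF]
      rw [if_neg (by omega), if_neg (by omega)]
      simp
    | succ idx' =>
      have hd : 0 ≤ d := by simpa using hpref 0 (by omega)
      simp only [bestF]
      have h1 : (if 0 ≤ v + d ∧ v + d ≤ mv then bestF mv rest (v + d) else -1) = -1 := by
        split_ifs with h
        · exact ih idx' (by simpa using hidx)
            (fun j hj => by simpa using hpref (j + 1) (by omega))
            (by simpa using hkill) (v + d) h.1 h.2
        · rfl
      have h2 : (if 0 ≤ v - d ∧ v - d ≤ mv then bestF mv rest (v - d) else -1) = -1 := by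
        split_ifs with h
        · exact ih idx' (by simpa using hidx)
            (fun j hj => by simpa using hpref (j + 1) (by omega))
            (by simpa using hkill) (v - d) h.1 h.2
        · rfl
      rw [h1, h2]
      simp

-- ---------- the bitmask-max bridge between A's forward loop and bestF ----------

lemma fm_ge (reach : Nat) (f : Nat → Int) :
    ∀ (L : List Nat) (a : Int),
    a ≤ L.foldl (fun m v => if reach.testBit v then max m (f v) else m) a := by
  intro L
  induction L with
  | nil => intro a; exact le_refl a
  | cons u L ih =>
    intro a
    simp only [List.foldl_cons]
    refine le_trans ?_ (ih _)
    split
    · exact le_max_left _ _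
    · exact le_refl _

lemma fm_le (reach : Nat) (f : Nat → Int) :
    ∀ (L : List Nat) (a : Int) (v : Nat), v ∈ L → reach.testBit v = true →
    f v ≤ L.foldl (fun m v => if reach.testBit v then max m (f v) else m) a := by
  intro L
  induction L with
  | nil => intro a v hv; simp at hv
  | cons u L ih =>
    intro a v hv hb
    simp only [List.foldl_cons]
    rcases List.mem_cons.mp hv with h | h
    · subst h
      refine le_trans ?_ (fm_ge reach f L _)
      rw [if_pos hb]
      exact le_max_right _ _
    · exact ih _ v h hb

lemma fm_cases (reach : Nat) (f : Nat → Int) :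
    ∀ (L : List Nat) (a : Int),
    L.foldl (fun m v => if reach.testBit v then max m (f v) else m) a = a ∨
    ∃ v, v ∈ L ∧ reach.testBit v = true ∧
      L.foldl (fun m v => if reach.testBit v then max m (f v) else m) a = f v := by
  intro L
  induction L with
  | nil => intro a; exact Or.inl rfl
  | cons u L ih =>
    intro a
    simp only [List.foldl_cons]
    by_cases hb : reach.testBit u = true
    · rw [if_pos hb]
      rcases ih (max a (f u)) with h | ⟨v, hv, hb', he⟩
      · rcases max_choice a (f u) with hm | hm
        · exact Or.inl (by rw [h, hm])
        · exact Or.inr ⟨u, by simp, hb, by rw [h, hm]⟩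
      · exact Or.inr ⟨v, List.mem_cons_of_mem _ hv, hb', he⟩
    · rw [if_neg hb]
      rcases ih a with h | ⟨v, hv, hb', he⟩
      · exact Or.inl h
      · exact Or.inr ⟨v, List.mem_cons_of_mem _ hv, hb', he⟩

lemma bitsList_getD (reach N : Nat) (hb : ∀ v, N ≤ v → reach.testBit v = false) :
    ∀ v, ((List.range N).map reach.testBit).getD v false = reach.testBit v := by
  intro v
  by_cases h : v < N
  · rw [List.getD_eq_getElem?_getD, List.getElem?_map, List.getElem?_range h]
    rfl
  · rw [List.getD_eq_getElem?_getD, List.getElem?_eq_none (by simp; omega), hb v (by omega)]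
    rfl

lemma reach'_bitNat (reach : Nat) (d mv : Int) (hd : 0 ≤ d) (hmv : 0 ≤ mv)
    (hb : ∀ v, (mv + 1).toNat ≤ v → reach.testBit v = false) (v : Nat) :
    Nat.testBit (((reach <<< d.toNat) ||| (reach >>> d.toNat)) &&& (2 ^ (mv + 1).toNat - 1)) v
      = true ↔
    ∃ u, u < (mv + 1).toNat ∧ reach.testBit u = true ∧
      (((u : Int) + d = v ∧ (v : Int) ≤ mv) ∨ ((u : Int) - d = v)) := by
  have hbits := bitsList_getD reach (mv + 1).toNat hb
  rw [reach'_testBit reach d mv hd hmv _ (by simp) hbits v]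
  constructor <;> rintro ⟨u, h1, h2, h3⟩
  · exact ⟨u, h1, by rw [← hbits u]; exact h2, h3⟩
  · exact ⟨u, h1, by rw [hbits u]; exact h2, h3⟩

lemma bLoop_eq_bestF (mv : Int) (hmv : 0 ≤ mv) :
    ∀ (vols : List Int), (∀ d ∈ vols, 0 ≤ d) → ∀ (reach : Nat), reach ≠ 0 →
    (∀ v, (mv + 1).toNat ≤ v → reach.testBit v = false) →
    bLoop ((1 <<< (mv + 1).toNat) - 1) vols reach
      = bitFoldMax (mv + 1).toNat reach (fun w => bestF mv vols (w : Int)) := by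
  intro vols
  induction vols with
  | nil =>
    intro _ reach hne hb
    have hbit := testBit_log2 reach hne
    have hlogN : Nat.log2 reach < (mv + 1).toNat := by
      by_contra h
      rw [hb _ (by omega)] at hbit
      cases hbit
    have hL : bLoop ((1 <<< (mv + 1).toNat) - 1) [] reach = (Nat.log2 reach : Int) := by
      simp only [bLoop, bitLength]
      rw [if_neg hne]
      ring
    rw [hL]
    unfold bitFoldMax
    have hge := fm_le reach (fun w => bestF mv [] (w : Int)) (List.range (mv + 1).toNat) (-1)
      (Nat.log2 reach) (List.mem_range.mpr hlogN) hbit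
    rcases fm_cases reach (fun w => bestF mv [] (w : Int)) (List.range (mv + 1).toNat) (-1)
      with h | ⟨v, hv, hbv, he⟩
    · simp only [bestF] at hge h ⊢
      omega
    · have hvlog : v ≤ Nat.log2 reach := by
        by_contra hc
        rw [testBit_gt_log2 reach v (by omega)] at hbv
        cases hbv
      simp only [bestF] at hge he ⊢
      omega
  | cons d rest ih =>
    intro hpos reach hne hb
    have hd : 0 ≤ d := hpos d (by simp)
    have hL : bLoop ((1 <<< (mv + 1).toNat) - 1) (d :: rest) reach
        = (if ((reach <<< d.toNat) ||| (reach >>> d.toNat)) &&& (2 ^ (mv + 1).toNat - 1) = 0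
            then -1
            else bLoop ((1 <<< (mv + 1).toNat) - 1) rest
              (((reach <<< d.toNat) ||| (reach >>> d.toNat)) &&& (2 ^ (mv + 1).toNat - 1))) := by
      simp only [bLoop]
      rw [Nat.one_shiftLeft]
    rw [hL]
    by_cases hz : ((reach <<< d.toNat) ||| (reach >>> d.toNat)) &&& (2 ^ (mv + 1).toNat - 1) = 0
    · rw [if_pos hz]
      -- every reachable u has no valid move, so bestF (d :: rest) u = -1 on every bit
      have hdead : ∀ u : Nat, u < (mv + 1).toNat → reach.testBit u = true →
          bestF mv (d :: rest) (u : Int) = -1 := by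
        intro u hu hbit
        simp only [bestF]
        rw [if_neg ?_, if_neg ?_]
        · simp
        · rintro ⟨hq1, hq2⟩
          have := (reach'_bitNat reach d mv hd hmv hb ((u : Int) - d).toNat).mpr
            ⟨u, hu, hbit, Or.inr (by omega)⟩
          rw [hz, Nat.zero_testBit] at this
          cases this
        · rintro ⟨hp1, hp2⟩
          have := (reach'_bitNat reach d mv hd hmv hb ((u : Int) + d).toNat).mpr
            ⟨u, hu, hbit, Or.inl ⟨by omega, by omega⟩⟩
          rw [hz, Nat.zero_testBit] at this
          cases this
      rcases fm_cases reach (fun w => bestF mv (d :: rest) (w : Int))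
          (List.range (mv + 1).toNat) (-1) with h | ⟨v, hv, hbv, he⟩
      · exact h.symm
      · exact (hdead v (List.mem_range.mp hv) hbv).symm.trans he.symm
    · rw [if_neg hz]
      have hb' : ∀ v, (mv + 1).toNat ≤ v →
          Nat.testBit (((reach <<< d.toNat) ||| (reach >>> d.toNat))
            &&& (2 ^ (mv + 1).toNat - 1)) v = false := by
        intro v hv
        rw [Nat.testBit_and, Nat.testBit_two_pow_sub_one]
        simp
        omega
      rw [ih (fun v hv => hpos v (by simp [hv])) _ hz hb']
      set reach' := ((reach <<< d.toNat) ||| (reach >>> d.toNat)) &&& (2 ^ (mv + 1).toNat - 1)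
        with hreach'
      apply le_antisymm
      · -- fold over reach' (bestF rest) ≤ fold over reach (bestF (d :: rest))
        rcases fm_cases reach' (fun w => bestF mv rest (w : Int))
            (List.range (mv + 1).toNat) (-1) with h | ⟨v, hv, hbv, he⟩
        · exact le_trans (le_of_eq h)
            (fm_ge reach (fun w => bestF mv (d :: rest) (w : Int)) (List.range (mv + 1).toNat) (-1))
        · obtain ⟨u, hu, hbit, hc⟩ := (reach'_bitNat reach d mv hd hmv hb v).mp hbv
          have hstep : bestF mv rest (v : Int) ≤ bestF mv (d :: rest) (u : Int) := by
            have hvN : (v : Int) ≤ mv := by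
              have := List.mem_range.mp hv
              omega
            rcases hc with ⟨hsum, _⟩ | hdiff
            · refine le_trans ?_ (le_max_left _ _)
              rw [if_pos (⟨by omega, by omega⟩ : 0 ≤ (u : Int) + d ∧ (u : Int) + d ≤ mv),
                  show (u : Int) + d = (v : Int) from hsum]
            · refine le_trans ?_ (le_max_right _ _)
              rw [if_pos (⟨by omega, by omega⟩ : 0 ≤ (u : Int) - d ∧ (u : Int) - d ≤ mv),
                  show (u : Int) - d = (v : Int) from hdiff]
          exact le_trans (le_of_eq he) (le_trans hstep
            (fm_le reach (fun w => bestF mv (d :: rest) (w : Int)) (List.range (mv + 1).toNat)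
              (-1) u (List.mem_range.mpr hu) hbit))
      · -- fold over reach (bestF (d :: rest)) ≤ fold over reach' (bestF rest)
        rcases fm_cases reach (fun w => bestF mv (d :: rest) (w : Int))
            (List.range (mv + 1).toNat) (-1) with h | ⟨u, hu, hbit, he⟩
        · exact le_trans (le_of_eq h)
            (fm_ge reach' (fun w => bestF mv rest (w : Int)) (List.range (mv + 1).toNat) (-1))
        · have huN : u < (mv + 1).toNat := List.mem_range.mp hu
          have hbranch : bestF mv (d :: rest) (u : Int)
              ≤ bitFoldMax (mv + 1).toNat reach' (fun w => bestF mv rest (w : Int)) := by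
            simp only [bestF]
            apply max_le
            · split_ifs with hp
              · have hbit' := (reach'_bitNat reach d mv hd hmv hb ((u : Int) + d).toNat).mpr
                  ⟨u, huN, hbit, Or.inl ⟨by omega, by omega⟩⟩
                have h1 : bestF mv rest ((u : Int) + d)
                    = bestF mv rest (((((u : Int) + d).toNat) : Nat) : Int) := by
                  rw [Int.toNat_of_nonneg hp.1]
                rw [h1]
                exact fm_le reach' (fun w => bestF mv rest (w : Int)) (List.range (mv + 1).toNat)
                  (-1) (((u : Int) + d).toNat) (List.mem_range.mpr (by omega)) hbit'
              · exact fm_ge reach' (fun w => bestF mv rest (w : Int))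
                  (List.range (mv + 1).toNat) (-1)
            · split_ifs with hq
              · have hbit' := (reach'_bitNat reach d mv hd hmv hb ((u : Int) - d).toNat).mpr
                  ⟨u, huN, hbit, Or.inr (by omega)⟩
                have h1 : bestF mv rest ((u : Int) - d)
                    = bestF mv rest (((((u : Int) - d).toNat) : Nat) : Int) := by
                  rw [Int.toNat_of_nonneg hq.1]
                rw [h1]
                exact fm_le reach' (fun w => bestF mv rest (w : Int)) (List.range (mv + 1).toNat)
                  (-1) (((u : Int) - d).toNat) (List.mem_range.mpr (by omega)) hbit'
              · exact fm_ge reach' (fun w => bestF mv rest (w : Int))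
                  (List.range (mv + 1).toNat) (-1)
          exact le_trans (le_of_eq he) hbranch

lemma fm_singleton (N sv : Nat) (hsv : sv < N) (f : Nat → Int) (hf : -1 ≤ f sv) :
    bitFoldMax N (1 <<< sv) f = f sv := by
  have hb : ∀ v, (1 <<< sv).testBit v = true ↔ v = sv := by
    intro v
    rw [Nat.one_shiftLeft, Nat.testBit_two_pow]
    simp [eq_comm]
  have hge : f sv ≤ bitFoldMax N (1 <<< sv) f :=
    fm_le _ _ _ _ sv (List.mem_range.mpr hsv) ((hb sv).mpr rfl)
  rcases fm_cases (1 <<< sv) f (List.range N) (-1) with h | ⟨v, hv, hbv, he⟩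
  · unfold bitFoldMax at hge ⊢
    omega
  · have : v = sv := (hb v).mp hbv
    subst this
    exact he

-- shift lemmas: a negative start in range is the same input as start + max_volume + 1 (both ports)
lemma pySetTrue_wrap (row : List Bool) (sv mv : Int) (hrow : row.length = (mv + 1).toNat)
    (hn : sv < 0) (hlo : -(mv + 1) ≤ sv) (hmv : 0 ≤ mv) :
    pySetTrue row sv = pySetTrue row (sv + mv + 1) := by
  unfold pySetTrue
  rw [show (if sv < 0 then sv + (row.length : Int) else sv) = sv + mv + 1 by
        rw [if_pos hn, hrow]; omega,
      show (if sv + mv + 1 < 0 then sv + mv + 1 + (row.length : Int) else sv + mv + 1)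
          = sv + mv + 1 from if_neg (by omega)]

lemma play_music_shift (sc sv mv : Int) (vols : List Int)
    (hn : sv < 0) (hlo : -(mv + 1) ≤ sv) (hmv : 0 ≤ mv) :
    play_music sc sv mv vols = play_music sc (sv + mv + 1) mv vols := by
  unfold play_music
  dsimp only
  congr 1
  by_cases h : (sc + 1).toNat = 0
  · rw [h]
    rfl
  · obtain ⟨m, hm⟩ := Nat.exists_eq_succ_of_ne_zero h
    rw [hm, List.replicate_succ]
    unfold matSetTrue
    rw [List.modify_zero_cons, List.modify_zero_cons,
        pySetTrue_wrap _ sv mv (by simp) hn hlo hmv]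

lemma table_len (mv : Int) (vols : List Int) :
    (vols.foldr (bRow mv) ((List.range (mv + 1).toNat).map (fun v => Int.ofNat v))).length
      = (mv + 1).toNat := by
  cases vols with
  | nil => simp
  | cons d rest => simp [bRow]

lemma alt_shift (sc sv mv : Int) (vols : List Int)
    (hn : sv < 0) (hlo : -(mv + 1) ≤ sv) (hmv : 0 ≤ mv) :
    play_music_alt sc sv mv vols = play_music_alt sc (sv + mv + 1) mv vols := by
  unfold play_music_alt
  have hTlen := table_len mv vols
  set T := vols.foldr (bRow mv) ((List.range (mv + 1).toNat).map (fun v => Int.ofNat v)) with hT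
  set k := (-sv).toNat with hk
  rw [show sv = -(k : Int) by omega,
      PySem.List.pyGetD_neg_natCast T k (-1) (by omega) (by omega),
      show -(k : Int) + mv + 1 = ((T.length - k : Nat) : Int) by omega,
      PySem.List.pyGetD_natCast,
      List.getD_eq_getElem?_getD, List.getElem?_eq_getElem (show T.length - k < T.length by omega)]
  rfl

lemma main_core (sc sv mv : Int) (vols : List Int) (hsv0 : 0 ≤ sv) (hsvm : sv ≤ mv)
    (hbr : ((vols.length : Int) = sc ∧ ∀ v ∈ vols, 0 ≤ v) ∨
      (0 ≤ sc ∧ vols ≠ [] ∧ 0 ≤ vols.headD 0 ∧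
        mv - sv < vols.headD 0 ∧ sv < vols.headD 0) ∨
      (0 ≤ sc ∧ ∃ i, i < vols.length ∧ (i : Int) ≤ sc ∧
        (∀ j : Nat, j ≤ i → 0 ≤ vols.getD j 0) ∧ mv < vols.getD i 0)) :
    play_music sc sv mv vols = play_music_alt sc sv mv vols := by
  unfold play_music
  dsimp only
  have hmv : 0 ≤ mv := le_trans hsv0 hsvm
  have hsvM : sv.toNat < (mv + 1).toNat := by omega
  have hAlt : play_music_alt sc sv mv vols = bestF mv vols sv := by
    unfold play_music_alt
    rw [show sv = ((sv.toNat : Nat) : Int) from (Int.toNat_of_nonneg hsv0).symm,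
        PySem.List.pyGetD_natCast, alt_table mv hmv vols sv.toNat hsvM]
  rw [hAlt]
  have hlen0 : 0 < (List.replicate (sc + 1).toNat
      (List.replicate (mv + 1).toNat false)).length := by
    have hsc : 0 ≤ sc := by
      rcases hbr with ⟨hlen, _⟩ | ⟨h, _⟩ | ⟨h, _⟩
      · omega
      · exact h
      · exact h
    simp; omega
  have hrow0 : (matSetTrue (List.replicate (sc + 1).toNat
        (List.replicate (mv + 1).toNat false)) 0 sv).getD 0 []
      = (List.replicate (mv + 1).toNat false).set sv.toNat true := by
    rw [getD_matSetTrue_self _ _ _ hlen0,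
        List.getD_replicate _ (by simpa using hlen0),
        pySetTrue_nonneg _ _ hsv0]
  have hbits0 : ∀ v, ((List.replicate (mv + 1).toNat false).set sv.toNat true).getD v false
      = Nat.testBit (1 <<< sv.toNat) v := by
    intro v
    rw [Nat.one_shiftLeft, Nat.testBit_two_pow,
        List.getD_eq_getElem?_getD, List.getElem?_set]
    split_ifs with h1 h2
    · simp [h1]
    · rw [List.length_replicate] at h2; omega
    · rw [List.getElem?_replicate]
      split <;> simp [h1]
  rcases hbr with ⟨hlen, hpos⟩ | ⟨hsc0, hnil, hv00, hk1, hk2⟩ | ⟨hsc0, idx, hidx, hisc, hpref, hiv⟩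
  · -- the normal domain
    have hreachne : (1 <<< sv.toNat) ≠ 0 := by
      rw [Nat.one_shiftLeft]; positivity
    have hbound : ∀ v, (mv + 1).toNat ≤ v → (1 <<< sv.toNat).testBit v = false := by
      intro v hv
      rw [Nat.one_shiftLeft, Nat.testBit_two_pow]
      simp
      omega
    have h1 : aLoop mv vols (matSetTrue (List.replicate (sc + 1).toNat
          (List.replicate (mv + 1).toNat false)) 0 sv) (0 + 1)
        = bLoop ((1 <<< (mv + 1).toNat) - 1) vols (1 <<< sv.toNat) := by
      apply loop_eq mv hmv vols _ 0 (1 <<< sv.toNat) hpos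
      · rw [length_matSetTrue, List.length_replicate]; omega
      · intro v; rw [hrow0]; exact hbits0 v
      · rw [hrow0]; simp
      · intro k hk1 hk2
        rw [getD_matSetTrue_ne _ _ _ _ (by omega)]
        rw [length_matSetTrue, List.length_replicate] at hk2
        exact List.getD_replicate _ hk2
      · exact hreachne
    have h2 := bLoop_eq_bestF mv hmv vols hpos (1 <<< sv.toNat) hreachne hbound
    have h3 := fm_singleton (mv + 1).toNat sv.toNat hsvM (fun w => bestF mv vols (w : Int))
      (bestF_lower mv vols _ (by positivity))
    refine h1.trans (h2.trans ?_)
    rw [h3]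
    show bestF mv vols ((sv.toNat : Nat) : Int) = bestF mv vols sv
    rw [Int.toNat_of_nonneg hsv0]
  · -- the first volume already empties the reachable set: both sides are -1
    obtain ⟨v0, rest, rfl⟩ := List.exists_cons_of_ne_nil hnil
    simp only [List.headD_cons] at hv00 hk1 hk2
    have hRHS : bestF mv (v0 :: rest) sv = -1 := by
      simp only [bestF]
      rw [if_neg (by omega), if_neg (by omega)]
      simp
    rw [hRHS]
    have hA : aInner (matSetTrue (List.replicate (sc + 1).toNat
        (List.replicate (mv + 1).toNat false)) 0 sv) 0 1 v0 mv
        = (matSetTrue (List.replicate (sc + 1).toNat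
            (List.replicate (mv + 1).toNat false)) 0 sv, false) := by
      unfold aInner
      apply foldl_matFun_noop
      intro bv hb
      rw [hrow0, hbits0 bv, Nat.one_shiftLeft, Nat.testBit_two_pow] at hb
      have hbv : sv.toNat = bv := by simpa using hb
      constructor <;> omega
    have h11 : (1 : Nat) - 1 = 0 := rfl
    simp only [aLoop, h11, hA]
    simp
  · -- some volume after a nonnegative prefix exceeds max_volume: both return -1
    have hrec := loop_kill mv hmv vols (matSetTrue (List.replicate (sc + 1).toNat
        (List.replicate (mv + 1).toNat false)) 0 sv) 0 (1 <<< sv.toNat) idx hidx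
      (by rw [length_matSetTrue, List.length_replicate]; omega)
      hpref hiv
      (fun v => by rw [hrow0]; exact hbits0 v)
      (by rw [hrow0]; simp)
      (fun k hk1 hk2 => by
        rw [getD_matSetTrue_ne _ _ _ _ (by omega)]
        rw [length_matSetTrue, List.length_replicate] at hk2
        exact List.getD_replicate _ hk2)
    rw [bestF_kill mv hmv vols idx hidx hpref hiv sv hsv0 hsvm]
    exact hrec

-- ===== VERDICT (by name: the statement is the Claim_ definition above) =====
theorem play_music_spec : Claim_equal_play_music := by
  intro sc sv mv vols hdom hpre
  obtain ⟨hmv0, hlo, hhi, hbr⟩ := hpre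
  unfold Spec_play_music
  by_cases hn : sv < 0
  · rw [show effStart sv mv = sv + mv + 1 from if_pos hn] at hbr
    rw [play_music_shift sc sv mv vols hn hlo hmv0, alt_shift sc sv mv vols hn hlo hmv0]
    exact main_core sc (sv + mv + 1) mv vols (by omega) (by omega) hbr
  · rw [show effStart sv mv = sv from if_neg hn] at hbr
    exact main_core sc sv mv vols (by omega) (by omega) hbr
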